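-- pv_equiv track=rewrite | github.com/Roflkemper/chat-bot-v2 | scripts/daily_kpi_report.py | _gc_breakdown
-- ===== SOURCE A (Python) =====
-- from collections import Counter, defaultdict
--
-- def _gc_breakdown(audit: list[dict]) -> tuple[Counter, dict]:
--     decisions = Counter()
--     by_type = defaultdict(Counter)
--     for r in audit:
--         d = str(r.get("decision", "")).split("(")[0].strip()
--         decisions[d] += 1
--         by_type[r.get("setup_type", "?")][d] += 1
--     return decisions, dict(by_type)
-- ===== SOURCE B (Python) =====
-- from collections import Counter
--
-- def _gc_breakdown(audit: list[dict]) -> tuple[Counter, dict]: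
--     ds = [str(r.get("decision", "")).split("(")[0].strip() for r in audit]
--     ts = [r.get("setup_type", "?") for r in audit]
--     decisions = Counter({d: ds.count(d) for d in dict.fromkeys(ds)})
--     by_type = {}
--     for t in dict.fromkeys(ts):
--         sub = [d for t2, d in zip(ts, ds) if t2 == t]
--         by_type[t] = Counter({d: sub.count(d) for d in dict.fromkeys(sub)})
--     return decisions, by_type
-- ===== Notes on version B (the rewrite author's own statement) =====
-- stated objective: alternative
-- what changed: Replaces the incremental Counter/defaultdict mutation loop by a declarative group-by: normalize all decisions and setup types in two map passes, then build the overall counter as {d: ds.count(d)} over first occurrences and each per-type counter by filtering the (type, decision) pairs per distinct type and counting.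
import Mathlib
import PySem

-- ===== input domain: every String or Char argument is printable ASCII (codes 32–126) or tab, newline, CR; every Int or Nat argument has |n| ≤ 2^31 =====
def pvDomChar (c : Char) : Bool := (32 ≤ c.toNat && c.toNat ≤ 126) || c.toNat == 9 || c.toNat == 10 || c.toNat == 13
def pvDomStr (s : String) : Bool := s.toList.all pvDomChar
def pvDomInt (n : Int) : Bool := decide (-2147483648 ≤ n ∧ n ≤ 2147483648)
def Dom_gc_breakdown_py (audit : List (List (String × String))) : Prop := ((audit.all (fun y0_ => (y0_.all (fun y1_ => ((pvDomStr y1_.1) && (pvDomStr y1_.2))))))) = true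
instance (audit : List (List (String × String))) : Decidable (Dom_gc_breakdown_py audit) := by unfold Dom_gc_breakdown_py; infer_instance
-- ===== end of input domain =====

-- B replaces A's incremental Counter/defaultdict mutation loop by a declarative group-by
-- (distinct keys + filter + count); alternative decomposition, same return value.

-- shared normalization helpers (identical expressions in both Pythons):
-- str(r.get("decision","")).split("(")[0].strip()  (split with the nonempty sep "(" never fails
-- and never returns an empty list, so split? … "(" is always `some` and [0] = headD "")
def pvNormD (r : List (String × String)) : String :=
  PySem.Str.strip ((((PySem.Str.split? ((PySem.Dict.mk r).getD "decision" "") "(").getD []).headD ""))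

-- r.get("setup_type", "?")
def pvNormT (r : List (String × String)) : String :=
  (PySem.Dict.mk r).getD "setup_type" "?"

-- ===== PORT A =====
def gc_breakdown_py (audit : List (List (String × String))) : (List (String × Int)) × (List (String × List (String × Int))) :=
  let st := audit.foldl
    (fun (st : PySem.Dict String Int × PySem.Dict String (PySem.Dict String Int)) r =>
      let d := pvNormD r
      (st.1.modify d 0 (· + 1),
       st.2.modify (pvNormT r) PySem.Dict.empty (fun c => c.modify d 0 (· + 1))))
    (PySem.Dict.empty, PySem.Dict.empty)
  (st.1.items, st.2.items.map (fun p => (p.1, p.2.items)))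

-- ===== PORT B =====
def gc_breakdown_py_alt (audit : List (List (String × String))) : (List (String × Int)) × (List (String × List (String × Int))) :=
  let ds := audit.map pvNormD
  let ts := audit.map pvNormT
  let decisions := (PySem.Set.ofList ds).map (fun d => (d, (ds.count d : Int)))
  let pairs := ts.zip ds
  let by_type := (PySem.Set.ofList ts).map (fun t =>
    let sub := (pairs.filter (fun p => p.1 == t)).map (·.2)
    (t, (PySem.Set.ofList sub).map (fun d => (d, (sub.count d : Int)))))
  (decisions, by_type)

-- ===== PRECONDITION & SPEC =====
def Spec_gc_breakdown_py (audit : List (List (String × String))) (out : (List (String × Int)) × (List (String × List (String × Int)))) : Prop := out = gc_breakdown_py_alt audit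
instance (audit : List (List (String × String))) (out : (List (String × Int)) × (List (String × List (String × Int)))) : Decidable (Spec_gc_breakdown_py audit out) := by unfold Spec_gc_breakdown_py; infer_instance

-- ===== CLAIM (what is proved, stated in full; the proofs are below) =====
def Claim_equal_gc_breakdown_py : Prop := ∀ (audit : List (List (String × String))), Dom_gc_breakdown_py audit → Spec_gc_breakdown_py audit (gc_breakdown_py audit)

-- ===== LEMMAS AND PROOFS =====

-- A's grouped fold, looked up at any key t, is the counter loop over the decisions of the rows of type t.
theorem pv_groupGetD (xs : List (String × String)) (bt0 : PySem.Dict String (PySem.Dict String Int)) (t : String) :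
    (List.foldl (fun bt p => bt.modify p.1 PySem.Dict.empty (fun c => c.modify p.2 0 (· + 1))) bt0 xs).getD t PySem.Dict.empty
    = List.foldl (fun c d => c.modify d 0 (· + 1)) (bt0.getD t PySem.Dict.empty) ((xs.filter (fun p => p.1 == t)).map (·.2)) := by
  induction xs generalizing bt0 with
  | nil => rfl
  | cons p xs ih =>
    simp only [List.foldl_cons, ih, List.filter_cons]
    by_cases h : p.1 = t
    · simp [h]
    · have h' : (p.1 == t) = false := by simp [h]
      simp [h', PySem.Dict.getD_modify, Ne.symm h]

-- the items of A's grouped fold: distinct keys in first-occurrence order, each with the counter of its group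
theorem pv_groupItems (xs : List (String × String)) :
    (List.foldl (fun bt p => bt.modify p.1 PySem.Dict.empty (fun c => c.modify p.2 0 (· + 1)))
        (PySem.Dict.empty : PySem.Dict String (PySem.Dict String Int)) xs).items
    = (PySem.Set.ofList (xs.map (·.1))).map
        (fun t => (t, PySem.Dict.counter ((xs.filter (fun p => p.1 == t)).map (·.2)))) := by
  set bt := List.foldl (fun bt p => bt.modify p.1 PySem.Dict.empty (fun c => c.modify p.2 0 (· + 1)))
      (PySem.Dict.empty : PySem.Dict String (PySem.Dict String Int)) xs with hbt
  have hkeys : bt.keys = PySem.Set.ofList (xs.map (·.1)) := by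
    have := PySem.Dict.keys_foldl_modify_key xs (fun p : String × String => p.1)
      (PySem.Dict.empty : PySem.Dict String Int)
      (fun _ p c => c.modify p.2 0 (· + 1)) PySem.Dict.empty
    simpa [PySem.Set.update_nil_left] using this
  have hnd : bt.keys.Nodup := by
    have := PySem.Dict.nodup_keys_foldl_modify_key xs (fun p : String × String => p.1)
      (PySem.Dict.empty : PySem.Dict String Int)
      (fun _ p c => c.modify p.2 0 (· + 1)) PySem.Dict.empty (by simp)
    simpa using this
  rw [PySem.Dict.items_eq_map_keys bt hnd PySem.Dict.empty, hkeys]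
  refine List.map_congr_left (fun t _ => ?_)
  rw [hbt, pv_groupGetD, PySem.Dict.getD_empty, ← PySem.Dict.counter_eq_foldl]

theorem gc_breakdown_py_spec : Claim_equal_gc_breakdown_py := by
  intro audit _
  unfold Spec_gc_breakdown_py
  simp only [gc_breakdown_py, gc_breakdown_py_alt]
  rw [PySem.List.foldl_prod_mk
      (f := fun (dec : PySem.Dict String Int) r => dec.modify (pvNormD r) 0 (· + 1))
      (g := fun (bt : PySem.Dict String (PySem.Dict String Int)) r =>
        bt.modify (pvNormT r) PySem.Dict.empty (fun c => c.modify (pvNormD r) 0 (· + 1)))]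
  have hzip : (audit.map pvNormT).zip (audit.map pvNormD)
      = audit.map (fun r => (pvNormT r, pvNormD r)) := List.zip_map'
  have hdec : List.foldl (fun (dec : PySem.Dict String Int) r => dec.modify (pvNormD r) 0 (· + 1))
        PySem.Dict.empty audit = PySem.Dict.counter (audit.map pvNormD) := by
    rw [PySem.Dict.counter_eq_foldl, List.foldl_map]
  have hfold : List.foldl (fun (bt : PySem.Dict String (PySem.Dict String Int)) r =>
        bt.modify (pvNormT r) PySem.Dict.empty (fun c => c.modify (pvNormD r) 0 (· + 1)))
        PySem.Dict.empty audit
      = List.foldl (fun bt p => bt.modify p.1 PySem.Dict.empty (fun c => c.modify p.2 0 (· + 1)))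
        PySem.Dict.empty (audit.map (fun r => (pvNormT r, pvNormD r))) := by
    rw [List.foldl_map]
  have hts : (audit.map (fun r => (pvNormT r, pvNormD r))).map (·.1) = audit.map pvNormT := by
    simp [List.map_map]
  refine Prod.ext ?_ ?_
  · simp only [hdec, PySem.Dict.items_counter]
  · simp only [hzip, hfold, pv_groupItems, hts, List.map_map]
    refine List.map_congr_left (fun t _ => ?_)
    simp [Function.comp, PySem.Dict.items_counter]
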